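-- pv_equiv track=rewrite | github.com/s0984-rgb/python-scripts | archivist/libs/Extractor.py | _reduce_map
-- ===== SOURCE A (Python) =====
-- def _reduce_map(data):
--     data_map = {}
--     for key in data:
--         archive_name = key['archive_name']
--         relative_path = key['relative_path']
--         try:
--             data_map[archive_name].append(relative_path)
--         except KeyError:
--             data_map[archive_name] = [relative_path]
--         except Exception as error:
--             raise error
--     return data_map
-- ===== SOURCE B (Python) =====
-- def _reduce_map(data):
--     pairs = [(key['archive_name'], key['relative_path']) for key in data]
--     return {name: [p for n, p in pairs if n == name]
--             for name in dict.fromkeys(n for n, _ in pairs)}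
-- ===== Notes on version B (the rewrite author's own statement) =====
-- stated objective: simpler
-- what changed: Replaces the try/except dict-accumulation loop with a declarative two-pass build: extract (name, path) pairs once, dedup the names in first-occurrence order with dict.fromkeys, and assemble the result by a comprehension filtering each name's paths.
import Mathlib
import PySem

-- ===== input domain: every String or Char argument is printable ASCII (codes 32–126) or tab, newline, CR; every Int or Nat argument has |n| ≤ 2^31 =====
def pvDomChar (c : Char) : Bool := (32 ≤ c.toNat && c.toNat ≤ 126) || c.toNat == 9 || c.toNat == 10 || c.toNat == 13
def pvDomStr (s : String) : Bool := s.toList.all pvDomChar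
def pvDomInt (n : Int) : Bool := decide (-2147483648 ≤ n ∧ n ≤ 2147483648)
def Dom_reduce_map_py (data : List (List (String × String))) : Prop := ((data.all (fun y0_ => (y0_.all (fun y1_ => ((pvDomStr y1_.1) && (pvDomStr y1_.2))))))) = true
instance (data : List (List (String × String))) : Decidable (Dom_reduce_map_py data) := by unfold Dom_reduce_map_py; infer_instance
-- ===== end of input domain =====

-- B replaces A's try/except accumulation loop with a pairs/dedup/filter comprehension build (objective: simpler).

-- ===== PORT A =====
-- key['archive_name'] / key['relative_path']: first-match lookup; under Pre_ both keys exist, so getD "" is never the default.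
def reduce_map_py (data : List (List (String × String))) : List (String × List String) :=
  (data.foldl (fun (m : PySem.Dict String (List String)) key =>
      let an := ((PySem.Dict.mk key).get? "archive_name").getD ""
      let rp := ((PySem.Dict.mk key).get? "relative_path").getD ""
      match m.get? an with
      | some l => m.insert an (l ++ [rp])   -- data_map[archive_name].append(relative_path)
      | none   => m.insert an [rp]          -- except KeyError: data_map[archive_name] = [relative_path]
    ) PySem.Dict.empty).items

-- ===== PORT B =====
def reduce_map_py_alt (data : List (List (String × String))) : List (String × List String) :=
  let pairs := data.map (fun key =>
      (((PySem.Dict.mk key).get? "archive_name").getD "",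
       ((PySem.Dict.mk key).get? "relative_path").getD ""))
  (PySem.List.dedup (pairs.map (·.1))).map
    (fun n => (n, (pairs.filter (fun p => p.1 == n)).map (·.2)))

-- ===== PRECONDITION & SPEC =====
-- Pre_ excludes exactly the inputs where A raises KeyError: some item lacks 'archive_name' or 'relative_path'.
def Pre_reduce_map_py (data : List (List (String × String))) : Prop :=
  (data.all (fun key => (PySem.Dict.mk key).contains "archive_name"
                      && (PySem.Dict.mk key).contains "relative_path")) = true
instance (data : List (List (String × String))) : Decidable (Pre_reduce_map_py data) := by
  unfold Pre_reduce_map_py; infer_instance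

def pvWitness_reduce_map_py : (List (List (String × String))) :=
  [[("archive_name", "a"), ("relative_path", "p")],
   [("archive_name", "b"), ("relative_path", "q")],
   [("archive_name", "a"), ("relative_path", "r")]]

def Spec_reduce_map_py (data : List (List (String × String))) (out : List (String × List String)) : Prop := out = reduce_map_py_alt data
instance (data : List (List (String × String))) (out : List (String × List String)) : Decidable (Spec_reduce_map_py data out) := by unfold Spec_reduce_map_py; infer_instance

-- ===== CLAIM (what is proved, stated in full; the proofs are below) =====
def Claim_equal_reduce_map_py : Prop := ∀ (data : List (List (String × String))), Dom_reduce_map_py data → Pre_reduce_map_py data → Spec_reduce_map_py data (reduce_map_py data)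

-- ===== LEMMAS AND PROOFS =====

-- A's try/except step is Dict.modify (append-to-group).
theorem step_eq_modify (m : PySem.Dict String (List String)) (a r : String) :
    (match m.get? a with
     | some l => m.insert a (l ++ [r])
     | none   => m.insert a [r]) = m.modify a [] (· ++ [r]) := by
  simp only [PySem.Dict.modify, PySem.Dict.getD_eq_get?_getD]
  cases m.get? a <;> simp

-- ===== VERDICT (by name: the statement is the Claim_ definition above) =====
theorem reduce_map_py_spec : Claim_equal_reduce_map_py := by
  intro data _ _
  unfold Spec_reduce_map_py reduce_map_py reduce_map_py_alt
  set pairs := data.map (fun key =>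
      (((PySem.Dict.mk key).get? "archive_name").getD "",
       ((PySem.Dict.mk key).get? "relative_path").getD "")) with hpairs
  have hfold : data.foldl (fun (m : PySem.Dict String (List String)) key =>
      let an := ((PySem.Dict.mk key).get? "archive_name").getD ""
      let rp := ((PySem.Dict.mk key).get? "relative_path").getD ""
      match m.get? an with
      | some l => m.insert an (l ++ [rp])
      | none   => m.insert an [rp]) PySem.Dict.empty
      = pairs.foldl (fun m p => m.modify p.1 [] (· ++ [p.2])) PySem.Dict.empty := by
    rw [hpairs, List.foldl_map]
    congr 1
    funext m key
    exact step_eq_modify m _ _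
  rw [hfold]
  set d := pairs.foldl (fun m p => m.modify p.1 [] (· ++ [p.2])) PySem.Dict.empty with hd
  have hkeys : d.keys = PySem.List.dedup (pairs.map (·.1)) := by
    rw [hd, PySem.Dict.keys_foldl_modify_key]
    simp [PySem.Set.update_nil_left]
  have hnd : d.keys.Nodup := by
    rw [hkeys]; exact PySem.List.nodup_dedup _
  rw [PySem.Dict.items_eq_map_keys d hnd [], hkeys]
  apply List.map_congr_left
  intro n _
  have := PySem.Dict.getD_foldl_modify_append pairs PySem.Dict.empty n
  simp only [← hd] at this
  simp [this]
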